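-- pv_equiv track=rewrite | github.com/ashix99/LicenseCT | session_data.py | _heuristic_fragment_order
-- ===== SOURCE A (Python) =====
-- def _heuristic_fragment_order(fragments: list[str]) -> list[str]:
--     if len(fragments) <= 1:
--         return list(fragments)
--
--     first_index = next(
--         (index for index, fragment in enumerate(fragments) if fragment.lstrip().startswith(("{", "["))),
--         None,
--     )
--     last_index = next(
--         (
--             index
--             for index in range(len(fragments) - 1, -1, -1)
--             if fragments[index].rstrip().endswith(("}", "]"))
--         ),
--         None,
--     )
--
--     ordered: list[str] = []
--     used: set[int] = set()
--     if first_index is not None: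
--         ordered.append(fragments[first_index])
--         used.add(first_index)
--
--     for index, fragment in enumerate(fragments):
--         if index in used:
--             continue
--         if last_index is not None and index == last_index:
--             continue
--         ordered.append(fragment)
--         used.add(index)
--
--     if last_index is not None and last_index not in used:
--         ordered.append(fragments[last_index])
--         used.add(last_index)
--
--     for index, fragment in enumerate(fragments):
--         if index not in used:
--             ordered.append(fragment)
--
--     return ordered
-- ===== SOURCE B (Python) =====
-- def _heuristic_fragment_order(fragments: list[str]) -> list[str]:
--     if len(fragments) <= 1:
--         return list(fragments)
--
--     n = len(fragments)
--     first_index = next(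
--         (index for index, fragment in enumerate(fragments) if fragment.lstrip().startswith(("{", "["))),
--         None,
--     )
--     last_index = next(
--         (index for index in range(n - 1, -1, -1) if fragments[index].rstrip().endswith(("}", "]"))),
--         None,
--     )
--
--     def key(index: int) -> int:
--         if index == first_index:
--             return -1
--         if index == last_index:
--             return n
--         return index
--
--     return [fragments[index] for index in sorted(range(n), key=key)]
-- ===== Notes on version B (the rewrite author's own statement) =====
-- stated objective: simpler
-- what changed: Replaces A's three passes with a mutable used-set (including a dead final pass) by assigning each index a sort key (-1 for the chosen first fragment, n for the chosen last, its own position otherwise) and returning the fragments in key-sorted index order.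
import Mathlib
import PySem

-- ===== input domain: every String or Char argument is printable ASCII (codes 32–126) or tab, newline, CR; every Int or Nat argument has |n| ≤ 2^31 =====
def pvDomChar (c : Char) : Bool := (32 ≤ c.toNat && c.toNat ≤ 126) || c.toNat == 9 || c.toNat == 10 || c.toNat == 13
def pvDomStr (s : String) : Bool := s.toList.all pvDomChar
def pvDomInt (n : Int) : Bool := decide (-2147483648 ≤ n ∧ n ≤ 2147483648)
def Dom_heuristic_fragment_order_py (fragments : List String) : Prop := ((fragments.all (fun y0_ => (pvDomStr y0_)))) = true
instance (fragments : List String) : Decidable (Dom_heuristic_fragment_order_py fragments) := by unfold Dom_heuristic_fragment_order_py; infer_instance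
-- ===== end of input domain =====

-- B replaces A's used-set passes by a key-sorted index order (key -1 for the chosen first
-- fragment, n for the chosen last, own position otherwise): simpler, same return value.

-- ===== PORT A =====
-- Helpers shared by both ports: both Python versions compute first_index / last_index
-- with literally the same two next(...) generator expressions.
def pvIsOpen (f : String) : Bool :=
  PySem.Str.startswith (PySem.Str.lstrip f) "{" || PySem.Str.startswith (PySem.Str.lstrip f) "["
def pvIsClose (f : String) : Bool :=
  PySem.Str.endswith (PySem.Str.rstrip f) "}" || PySem.Str.endswith (PySem.Str.rstrip f) "]"
def pvFirstIndex? (fragments : List String) : Option Int :=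
  ((PySem.List.enumerate fragments 0).find? (fun p => pvIsOpen p.2)).map (fun p => p.1)
def pvLastIndex? (fragments : List String) : Option Int :=
  (PySem.List.pyRange ((fragments.length : Int) - 1) (-1) (-1)).find?
    (fun i => pvIsClose (PySem.List.pyGetD fragments i ""))


def heuristic_fragment_order_py (fragments : List String) : List String :=
  if fragments.length ≤ 1 then fragments
  else
    let first_index := pvFirstIndex? fragments
    let last_index := pvLastIndex? fragments
    let st0 : List String × PySem.Set Int :=
      match first_index with
      | some fi => ([PySem.List.pyGetD fragments fi ""], PySem.Set.add PySem.Set.empty fi)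
      | none => ([], PySem.Set.empty)
    let st1 := (PySem.List.enumerate fragments 0).foldl
      (fun (st : List String × PySem.Set Int) p =>
        if PySem.Set.contains st.2 p.1 then st
        else if (match last_index with | some li => p.1 == li | none => false) then st
        else (st.1 ++ [p.2], PySem.Set.add st.2 p.1)) st0
    let st2 :=
      match last_index with
      | some li =>
          if PySem.Set.contains st1.2 li then st1
          else (st1.1 ++ [PySem.List.pyGetD fragments li ""], PySem.Set.add st1.2 li)
      | none => st1
    (PySem.List.enumerate fragments 0).foldl
      (fun acc p => if PySem.Set.contains st2.2 p.1 then acc else acc ++ [p.2]) st2.1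

-- ===== PORT B =====
def heuristic_fragment_order_py_alt (fragments : List String) : List String :=
  if fragments.length ≤ 1 then fragments
  else
    let n : Int := fragments.length
    let first_index := pvFirstIndex? fragments
    let last_index := pvLastIndex? fragments
    let key : Int → Int := fun i =>
      if first_index == some i then -1
      else if last_index == some i then n
      else i
    (PySem.List.sorted (PySem.List.pyRange 0 n) key).map
      (fun i => PySem.List.pyGetD fragments i "")

-- ===== PRECONDITION & SPEC =====
def Spec_heuristic_fragment_order_py (fragments : List String) (out : List String) : Prop := out = heuristic_fragment_order_py_alt fragments
instance (fragments : List String) (out : List String) : Decidable (Spec_heuristic_fragment_order_py fragments out) := by unfold Spec_heuristic_fragment_order_py; infer_instance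

-- ===== CLAIM (what is proved, stated in full; the proofs are below) =====
def Claim_equal_heuristic_fragment_order_py : Prop := ∀ (fragments : List String), Dom_heuristic_fragment_order_py fragments → Spec_heuristic_fragment_order_py fragments (heuristic_fragment_order_py fragments)

-- ===== LEMMAS AND PROOFS =====
lemma pv_firstIndex_bound (fragments : List String) (fi : Int)
    (h : pvFirstIndex? fragments = some fi) : 0 ≤ fi ∧ fi < (fragments.length : Int) := by
  unfold pvFirstIndex? at h
  cases hp : (PySem.List.enumerate fragments 0).find? (fun p => pvIsOpen p.2) with
  | none => rw [hp] at h; simp at h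
  | some p =>
    rw [hp] at h
    simp at h
    have hm := List.mem_of_find?_eq_some hp
    rw [PySem.List.mem_enumerate_iff] at hm
    obtain ⟨k, hk, rfl⟩ := hm
    simp at h ⊢
    omega

lemma pv_lastIndex_bound (fragments : List String) (li : Int)
    (h : pvLastIndex? fragments = some li) : 0 ≤ li ∧ li < (fragments.length : Int) := by
  unfold pvLastIndex? at h
  have hm := List.mem_of_find?_eq_some h
  rw [PySem.List.mem_pyRange_neg_one] at hm
  omega
lemma pv_contains_add (s : PySem.Set Int) (x y : Int) :
    PySem.Set.contains (PySem.Set.add s x) y = (PySem.Set.contains s y || y == x) := by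
  rw [Bool.eq_iff_iff]
  simp [PySem.Set.mem_add]

lemma pv_decide_shift (s i : Int) (x : String) (xs : List String) (hi : i ≠ s) :
    decide (s + 1 ≤ i) = decide (s ≤ i) ∧
    decide (i < s + 1 + (xs.length : Int)) = decide (i < s + ((x :: xs).length : Int)) := by
  refine ⟨decide_eq_decide.mpr (by omega), decide_eq_decide.mpr ?_⟩
  simp only [List.length_cons]; push_cast; omega

lemma pv_loopA (fi? li? : Option Int) (xs : List String) : ∀ (s : Int) (ord : List String) (used : PySem.Set Int),
    (∀ i : Int, s ≤ i → PySem.Set.contains used i = (fi? == some i)) →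
    ∃ u' : PySem.Set Int,
      ((PySem.List.enumerate xs s).foldl
        (fun (st : List String × PySem.Set Int) p =>
          if PySem.Set.contains st.2 p.1 then st
          else if li? == some p.1 then st
          else (st.1 ++ [p.2], PySem.Set.add st.2 p.1)) (ord, used)
        = (ord ++ ((PySem.List.enumerate xs s).filter
            (fun p => !(fi? == some p.1) && !(li? == some p.1))).map (fun p => p.2), u'))
      ∧ ∀ i : Int, PySem.Set.contains u' i =
          (PySem.Set.contains used i || (decide (s ≤ i) && decide (i < s + (xs.length : Int)) && !(li? == some i))) := by
  induction xs with
  | nil =>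
    intro s ord used _
    refine ⟨used, by simp [PySem.List.enumerate_nil], fun i => ?_⟩
    rw [Bool.eq_iff_iff]
    simp only [List.length_nil, Nat.cast_zero, add_zero, Bool.or_eq_true, Bool.and_eq_true,
      decide_eq_true_eq]
    constructor
    · exact Or.inl
    · rintro (h | ⟨⟨h1, h2⟩, _⟩)
      · exact h
      · omega
  | cons x xs ih =>
    intro s ord used hused
    rw [PySem.List.enumerate_cons]
    simp only [List.foldl_cons, List.filter_cons]
    have hs := hused s (le_refl s)
    by_cases hf : (fi? == some s) = true
    · -- s is the chosen first index: already in used, skipped; the filter drops it too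
      have hs' : PySem.Set.contains used s = true := by rw [hs, hf]
      simp only [hs', if_true, hf, Bool.not_true, Bool.false_and, Bool.false_eq_true, if_false]
      obtain ⟨u', he, hu⟩ := ih (s+1) ord used (fun i h1 => hused i (by omega))
      refine ⟨u', by rw [he], fun i => ?_⟩
      rw [hu i]
      by_cases hi : i = s
      · subst hi
        rw [hs']
        simp
      · obtain ⟨e1, e2⟩ := pv_decide_shift s i x xs hi
        rw [e1, e2]
    · have hff : (fi? == some s) = false := (Bool.not_eq_true _).mp hf
      have hs' : PySem.Set.contains used s = false := by rw [hs, hff]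
      by_cases hls : (li? == some s) = true
      · -- s is the chosen last index (and not the first): skipped here, the filter drops it
        simp only [hs', Bool.false_eq_true, if_false, hls, if_true, Bool.not_true, Bool.and_false]
        obtain ⟨u', he, hu⟩ := ih (s+1) ord used (fun i h1 => hused i (by omega))
        refine ⟨u', by rw [he], fun i => ?_⟩
        rw [hu i]
        by_cases hi : i = s
        · subst hi
          rw [hs', hls]
          simp
        · obtain ⟨e1, e2⟩ := pv_decide_shift s i x xs hi
          rw [e1, e2]
      · -- ordinary index: appended to the output and added to used
        have hls' : (li? == some s) = false := (Bool.not_eq_true _).mp hls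
        simp only [hs', Bool.false_eq_true, if_false, hls', hff, Bool.not_false, Bool.true_and,
          if_true]
        obtain ⟨u', he, hu⟩ := ih (s+1) (ord ++ [x]) (PySem.Set.add used s)
          (fun i h1 => by
            rw [pv_contains_add]
            have hbs : (i == s) = false := by simp only [beq_eq_false_iff_ne]; omega
            rw [hbs, Bool.or_false]
            exact hused i (by omega))
        refine ⟨u', ?_, fun i => ?_⟩
        · rw [he]
          simp only [List.map_cons, List.append_assoc, List.singleton_append]
        · rw [hu i, pv_contains_add]
          by_cases hi : i = s
          · subst hi
            rw [hs', hls']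
            simp
          · have hbs : (i == s) = false := by simp only [beq_eq_false_iff_ne]; omega
            rw [hbs, Bool.or_false]
            obtain ⟨e1, e2⟩ := pv_decide_shift s i x xs hi
            rw [e1, e2]
lemma pv_finalLoop (u : PySem.Set Int) (xs : List String) : ∀ (s : Int) (ord : List String),
    (∀ i : Int, s ≤ i → i < s + (xs.length : Int) → PySem.Set.contains u i = true) →
    (PySem.List.enumerate xs s).foldl
      (fun acc p => if PySem.Set.contains u p.1 then acc else acc ++ [p.2]) ord = ord := by
  induction xs with
  | nil => intro s ord _; simp [PySem.List.enumerate_nil]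
  | cons x xs ih =>
    intro s ord h
    rw [PySem.List.enumerate_cons]
    simp only [List.foldl_cons, h s (le_refl s) (by simp), if_true]
    exact ih (s+1) ord (fun i h1 h2 => h i (by omega)
      (by simp only [List.length_cons]; push_cast; omega))
def pvIdxList (fi? li? : Option Int) (n : Int) : List Int :=
  (match fi? with | some fi => [fi] | none => []) ++
  (PySem.List.pyRange 0 n).filter (fun i => !(fi? == some i) && !(li? == some i)) ++
  (match li? with | some li => if fi? == some li then [] else [li] | none => [])

lemma pv_mem_mid (fi? li? : Option Int) (n a : Int) :
    a ∈ (PySem.List.pyRange 0 n).filter (fun i => !(fi? == some i) && !(li? == some i)) ↔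
      (0 ≤ a ∧ a < n) ∧ fi? ≠ some a ∧ li? ≠ some a := by
  rw [List.mem_filter, PySem.List.mem_pyRange_one]
  simp

lemma pv_sortedB (fi? li? : Option Int) (n : Int)
    (hf : ∀ fi, fi? = some fi → 0 ≤ fi ∧ fi < n)
    (hl : ∀ li, li? = some li → 0 ≤ li ∧ li < n) :
    PySem.List.sorted (PySem.List.pyRange 0 n)
      (fun i => if fi? == some i then -1 else if li? == some i then n else i)
      = pvIdxList fi? li? n := by
  have hMnodup : ((PySem.List.pyRange 0 n).filter
      (fun i => !(fi? == some i) && !(li? == some i))).Nodup :=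
    (PySem.List.nodup_pyRange_one 0 n).filter _
  have hMpair : List.Pairwise (· < ·) ((PySem.List.pyRange 0 n).filter
      (fun i => !(fi? == some i) && !(li? == some i))) :=
    (PySem.List.pairwise_lt_pyRange_one 0 n).filter _
  have hkeymid : ∀ a ∈ (PySem.List.pyRange 0 n).filter
      (fun i => !(fi? == some i) && !(li? == some i)),
      (if fi? == some a then (-1 : Int) else if li? == some a then n else a) = a := by
    intro a ha
    rw [pv_mem_mid] at ha
    have h1 : (fi? == some a) = false := by simp [ha.2.1]
    have h2 : (li? == some a) = false := by simp [ha.2.2]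
    rw [h1, h2]; simp
  have hTmem : ∀ b ∈ (match li? with
      | some li => if fi? == some li then ([] : List Int) else [li] | none => []),
      li? = some b ∧ (fi? == some b) = false := by
    intro b hb
    rcases Option.eq_none_or_eq_some li? with hli | ⟨li, hli⟩
    · rw [hli] at hb; simp at hb
    · rw [hli] at hb
      by_cases hfl : (fi? == some li) = true
      · simp [hfl] at hb
      · simp [hfl] at hb
        subst hb
        exact ⟨hli, (Bool.not_eq_true _).mp hfl⟩
  have hHmem : ∀ a ∈ (match fi? with
      | some fi => ([fi] : List Int) | none => []), fi? = some a := by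
    intro a ha
    rcases Option.eq_none_or_eq_some fi? with hfi | ⟨fi, hfi⟩
    · rw [hfi] at ha; simp at ha
    · rw [hfi] at ha; simp at ha
      subst ha; exact hfi
  apply PySem.List.sorted_eq_of_perm_of_pairwise_lt
  · -- the reordered index list is a permutation of range(n)
    rw [List.perm_ext_iff_of_nodup ?_ (PySem.List.nodup_pyRange_one 0 n)]
    · intro a
      rw [PySem.List.mem_pyRange_one]
      unfold pvIdxList
      simp only [List.mem_append, pv_mem_mid]
      constructor
      · rintro ((h | ⟨hr, _, _⟩) | h)
        · exact hf a (hHmem a h)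
        · exact hr
        · exact hl a (hTmem a h).1
      · intro hr
        by_cases hfa : fi? = some a
        · left; left; rw [hfa]; simp
        · by_cases hla : li? = some a
          · right; rw [hla]
            have : (fi? == some a) = false := by simp [hfa]
            simp [this]
          · left; right; exact ⟨hr, hfa, hla⟩
    · -- Nodup of the reordered list
      unfold pvIdxList
      rw [List.nodup_append, List.nodup_append]
      refine ⟨⟨?_, hMnodup, ?_⟩, ?_, ?_⟩
      · cases fi? <;> simp
      · intro a ha b hb
        have hfa := hHmem a ha
        rw [pv_mem_mid] at hb
        intro h; subst h
        exact hb.2.1 hfa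
      · cases hli : li? with
        | none => simp
        | some li => by_cases hfl : (fi? == some li) = true <;> simp [hfl]
      · intro a ha b hb
        obtain ⟨hlib, hfib⟩ := hTmem b hb
        rw [List.mem_append] at ha
        intro h; subst h
        rcases ha with h | h
        · rw [hHmem a h] at hfib; simp at hfib
        · rw [pv_mem_mid] at h
          exact h.2.2 hlib
  · -- keys strictly increase along the reordered list
    unfold pvIdxList
    rw [List.pairwise_append, List.pairwise_append]
    refine ⟨⟨?_, ?_, ?_⟩, ?_, ?_⟩
    · cases fi? <;> simp
    · exact hMpair.imp_of_mem (fun {a b} ha hb hab => by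
        rw [hkeymid a ha, hkeymid b hb]; exact hab)
    · intro a ha b hb
      have hfa := hHmem a ha
      have hka : (if fi? == some a then (-1 : Int) else if li? == some a then n else a) = -1 := by
        rw [hfa]; simp
      rw [hka, hkeymid b hb]
      have := (pv_mem_mid fi? li? n b).mp hb
      omega
    · cases hli : li? with
      | none => simp
      | some li => by_cases hfl : (fi? == some li) = true <;> simp [hfl]
    · intro a ha b hb
      obtain ⟨hlib, hfib⟩ := hTmem b hb
      have hkb : (if fi? == some b then (-1 : Int) else if li? == some b then n else b) = n := by
        rw [hfib, hlib]; simp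
      rw [hkb]
      rw [List.mem_append] at ha
      rcases ha with h | h
      · have hfa := hHmem a h
        have hka : (if fi? == some a then (-1 : Int) else if li? == some a then n else a) = -1 := by
          rw [hfa]; simp
        rw [hka]
        have := hl b hlib
        omega
      · rw [hkeymid a h]
        have := (pv_mem_mid fi? li? n a).mp h
        omega
lemma pv_mid_eq' (fragments : List String) (fi? li? : Option Int) :
    ((PySem.List.enumerate fragments 0).filter
      (fun p => !(fi? == some p.1) && !(li? == some p.1))).map (fun p => p.2)
    = ((PySem.List.pyRange 0 (fragments.length : Int)).filter
        (fun i => !(fi? == some i) && !(li? == some i))).map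
        (fun i => PySem.List.pyGetD fragments i "") := by
  rw [show PySem.List.enumerate fragments 0 = PySem.List.enumerate fragments from rfl]
  rw [PySem.List.enumerate_eq_map_pyRange fragments ""]
  rw [List.filter_map, List.map_map]
  simp only [PySem.List.len_eq]
  rfl


lemma pv_main (fragments : List String) :
    heuristic_fragment_order_py fragments = heuristic_fragment_order_py_alt fragments := by
  by_cases hlen : fragments.length ≤ 1
  · simp only [heuristic_fragment_order_py, heuristic_fragment_order_py_alt, if_pos hlen]
  · simp only [heuristic_fragment_order_py, heuristic_fragment_order_py_alt, if_neg hlen]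
    rw [pv_sortedB (pvFirstIndex? fragments) (pvLastIndex? fragments) (fragments.length : Int)
      (fun fi h => pv_firstIndex_bound fragments fi h)
      (fun li h => pv_lastIndex_bound fragments li h)]
    unfold pvIdxList
    rw [List.map_append, List.map_append, ← pv_mid_eq' fragments]
    have hfun : (fun (st : List String × PySem.Set Int) (p : Int × String) =>
        if PySem.Set.contains st.2 p.1 then st
        else if (match pvLastIndex? fragments with | some li => p.1 == li | none => false) then st
        else (st.1 ++ [p.2], PySem.Set.add st.2 p.1))
      = (fun (st : List String × PySem.Set Int) (p : Int × String) =>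
        if PySem.Set.contains st.2 p.1 then st
        else if pvLastIndex? fragments == some p.1 then st
        else (st.1 ++ [p.2], PySem.Set.add st.2 p.1)) := by
      funext st p
      rcases Option.eq_none_or_eq_some (pvLastIndex? fragments) with h | ⟨li, h⟩
      · rw [h]; rfl
      · have hb : (p.1 == li) = ((some li : Option Int) == some p.1) := by
          rw [Bool.eq_iff_iff]
          constructor <;> (intro hh; simp only [beq_iff_eq, Option.some_inj] at hh ⊢; omega)
        simp only [h, hb]
    rw [hfun]
    rcases Option.eq_none_or_eq_some (pvFirstIndex? fragments) with hfi | ⟨fi, hfi⟩ <;>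
      simp only [hfi]
    · -- no first index
      obtain ⟨u1, he1, hu1⟩ := pv_loopA none (pvLastIndex? fragments)
        fragments 0 [] PySem.Set.empty (fun i _ => rfl)
      rw [he1]
      rcases Option.eq_none_or_eq_some (pvLastIndex? fragments) with hli | ⟨li, hli⟩ <;>
        simp only [hli] at hu1 ⊢
      · rw [pv_finalLoop u1 fragments 0 _
          (fun i h1 h2 => by rw [hu1 i]; simp; omega)]
        simp
      · have hcu : PySem.Set.contains u1 li = false := by
          rw [hu1 li]; simp
        rw [hcu]
        simp only [Bool.false_eq_true, if_false]
        rw [pv_finalLoop (PySem.Set.add u1 li) fragments 0 _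
          (fun i h1 h2 => by
            rw [pv_contains_add, hu1 i]
            by_cases hil : i = li
            · subst hil; simp
            · have : (i == li) = false := by simp only [beq_eq_false_iff_ne]; omega
              rw [this]
              have : ((some li : Option Int) == some i) = false := by
                simp only [beq_eq_false_iff_ne]; intro hh; exact hil (by injection hh; omega)
              rw [this]
              simp; omega)]
        simp
    · -- first index = fi
      obtain ⟨u1, he1, hu1⟩ := pv_loopA (some fi) (pvLastIndex? fragments)
        fragments 0 [PySem.List.pyGetD fragments fi ""] (PySem.Set.add PySem.Set.empty fi)
        (fun i _ => by
          rw [pv_contains_add]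
          have : PySem.Set.contains PySem.Set.empty i = false := rfl
          rw [this, Bool.false_or, Bool.eq_iff_iff]
          constructor <;> (intro hh; simp only [beq_iff_eq, Option.some_inj] at hh ⊢; omega))
      rw [he1]
      have hu0 : ∀ i : Int, PySem.Set.contains (PySem.Set.add PySem.Set.empty fi) i = (i == fi) := by
        intro i
        rw [pv_contains_add]
        rfl
      rcases Option.eq_none_or_eq_some (pvLastIndex? fragments) with hli | ⟨li, hli⟩ <;>
        simp only [hli] at hu1 ⊢
      · rw [pv_finalLoop u1 fragments 0 _
          (fun i h1 h2 => by rw [hu1 i, hu0 i]; simp; omega)]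
        simp
      · have hcu : PySem.Set.contains u1 li = ((some fi : Option Int) == some li) := by
          rw [hu1 li, hu0 li]
          have e : ((some li : Option Int) == some li) = true := by simp
          rw [e]
          simp only [Bool.not_true, Bool.and_false, Bool.or_false]
          rw [Bool.eq_iff_iff]
          simp only [beq_iff_eq, Option.some_inj]
          omega
        by_cases hfl : ((some fi : Option Int) == some li) = true
        · rw [hcu, hfl]
          simp only [if_true]
          rw [pv_finalLoop u1 fragments 0 _
            (fun i h1 h2 => by
              rw [hu1 i, hu0 i]
              by_cases hil : i = li
              · subst hil
                have : (i == fi) = true := by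
                  simp only [beq_iff_eq, Option.some_inj] at hfl ⊢; omega
                rw [this]; simp
              · have : ((some li : Option Int) == some i) = false := by
                  simp only [beq_eq_false_iff_ne]; intro hh; exact hil (by injection hh; omega)
                rw [this]; simp; omega)]
          simp
        · have hfl' : ((some fi : Option Int) == some li) = false := (Bool.not_eq_true _).mp hfl
          rw [hcu, hfl']
          simp only [Bool.false_eq_true, if_false]
          rw [pv_finalLoop (PySem.Set.add u1 li) fragments 0 _
            (fun i h1 h2 => by
              rw [pv_contains_add, hu1 i, hu0 i]
              by_cases hil : i = li
              · subst hil; simp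
              · have h3 : (i == li) = false := by simp only [beq_eq_false_iff_ne]; omega
                have h4 : ((some li : Option Int) == some i) = false := by
                  simp only [beq_eq_false_iff_ne]; intro hh; exact hil (by injection hh; omega)
                rw [h3, h4]; simp; omega)]
          simp

-- ===== VERDICT (by name: the statement is the Claim_ definition above) =====
theorem heuristic_fragment_order_py_spec : Claim_equal_heuristic_fragment_order_py := by
  intro fragments _
  unfold Spec_heuristic_fragment_order_py
  exact pv_main fragments
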